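-- pv_equiv track=rewrite | github.com/ukdhuri/litestardemo | lib/etl_service.py | mask_string_for_validation
-- ===== SOURCE A (Python) =====
-- def mask_string_for_validation(string_with_mask, string_to_mask, char_to_mask):
--     mask_locations = [i for i, char in enumerate(string_with_mask) if char == char_to_mask]
--     s2_len = len(string_to_mask)
--     string_to_mask = list(string_to_mask)
--     for loc in mask_locations:
--         if s2_len > loc:
--             string_to_mask[loc] = char_to_mask
--     string_to_mask = ''.join(string_to_mask)
--     return string_to_mask
-- ===== SOURCE B (Python) =====
-- def mask_string_for_validation(string_with_mask, string_to_mask, char_to_mask):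
--     return ''.join(
--         char_to_mask
--         if i < len(string_with_mask) and string_with_mask[i] == char_to_mask
--         else c
--         for i, c in enumerate(string_to_mask)
--     )
-- ===== Notes on version B (the rewrite author's own statement) =====
-- stated objective: simpler
-- what changed: Single gather pass over string_to_mask with a join, instead of collecting match indices from string_with_mask and scatter-writing into a mutable list copy.
import Mathlib
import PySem

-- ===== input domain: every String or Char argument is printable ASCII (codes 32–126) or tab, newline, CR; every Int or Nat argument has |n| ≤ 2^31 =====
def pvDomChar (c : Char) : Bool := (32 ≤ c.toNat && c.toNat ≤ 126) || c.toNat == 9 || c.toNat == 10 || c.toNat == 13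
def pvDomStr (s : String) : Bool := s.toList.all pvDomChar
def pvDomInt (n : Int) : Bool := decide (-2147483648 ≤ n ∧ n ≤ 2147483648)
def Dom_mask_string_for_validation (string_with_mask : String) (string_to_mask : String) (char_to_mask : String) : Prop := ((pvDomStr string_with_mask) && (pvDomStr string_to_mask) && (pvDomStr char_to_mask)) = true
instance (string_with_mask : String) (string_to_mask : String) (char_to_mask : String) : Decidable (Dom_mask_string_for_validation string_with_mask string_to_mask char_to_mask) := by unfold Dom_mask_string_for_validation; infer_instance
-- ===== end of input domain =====

-- B replaces A's two passes (collect match indices from string_with_mask, then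
-- scatter-write into a mutable list copy of string_to_mask) by a single gather pass
-- over string_to_mask (objective: simpler).

-- ===== PORT A =====
-- A: mask_locations = [i for i, char in enumerate(string_with_mask) if char == char_to_mask];
--    list(string_to_mask) is a Python list of one-character strings; scatter-write
--    char_to_mask at each in-range location; ''.join at the end.
def mask_string_for_validation (string_with_mask : String) (string_to_mask : String) (char_to_mask : String) : String :=
  let mask_locations : List Int :=
    (PySem.List.enumerate string_with_mask.toList 0).filterMap
      (fun p => if String.ofList [p.2] = char_to_mask then some p.1 else none)
  let s2_len : Int := (string_to_mask.toList.length : Int)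
  let lst : List String := string_to_mask.toList.map (fun c => String.ofList [c])
  let lst := mask_locations.foldl
      (fun l loc => if s2_len > loc then l.set loc.toNat char_to_mask else l) lst
  String.ofList (lst.flatMap String.toList)

-- ===== PORT B =====
-- B: ''.join(char_to_mask if i < len(swm) and swm[i] == char_to_mask else c
--            for i, c in enumerate(string_to_mask))
def mask_string_for_validation_alt (string_with_mask : String) (string_to_mask : String) (char_to_mask : String) : String :=
  String.ofList ((PySem.List.enumerate string_to_mask.toList 0).flatMap
    (fun p =>
      if p.1 < (string_with_mask.toList.length : Int) ∧
         (PySem.List.pyGet? string_with_mask.toList p.1).map (fun c => String.ofList [c]) = some char_to_mask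
      then char_to_mask.toList else [p.2]))

-- ===== PRECONDITION & SPEC =====
def Spec_mask_string_for_validation (string_with_mask : String) (string_to_mask : String) (char_to_mask : String) (out : String) : Prop := out = mask_string_for_validation_alt string_with_mask string_to_mask char_to_mask
instance (string_with_mask : String) (string_to_mask : String) (char_to_mask : String) (out : String) : Decidable (Spec_mask_string_for_validation string_with_mask string_to_mask char_to_mask out) := by unfold Spec_mask_string_for_validation; infer_instance

-- ===== CLAIM (what is proved, stated in full; the proofs are below) =====
def Claim_equal_mask_string_for_validation : Prop := ∀ (string_with_mask : String) (string_to_mask : String) (char_to_mask : String), Dom_mask_string_for_validation string_with_mask string_to_mask char_to_mask → Spec_mask_string_for_validation string_with_mask string_to_mask char_to_mask (mask_string_for_validation string_with_mask string_to_mask char_to_mask)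

-- ===== LEMMAS AND PROOFS =====

-- A's scatter loop, characterised elementwise: position j holds char_to_mask iff some
-- in-range location equals j (all locations are assumed nonnegative).
theorem foldl_set_getElem? (cm : String) (s2 : Int)
    (locs : List Int) (hnn : ∀ loc ∈ locs, 0 ≤ loc) (lst : List String) (j : Nat) :
    (locs.foldl (fun l loc => if s2 > loc then l.set loc.toNat cm else l) lst)[j]? =
      if (∃ loc ∈ locs, loc = (j : Int) ∧ s2 > loc) ∧ j < lst.length
      then some cm else lst[j]? := by
  induction locs generalizing lst with
  | nil => simp
  | cons loc rest ih =>
    have h0 : 0 ≤ loc := hnn loc List.mem_cons_self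
    have hnn' : ∀ l ∈ rest, 0 ≤ l := fun l hl => hnn l (List.mem_cons_of_mem _ hl)
    simp only [List.foldl_cons]
    by_cases hgt : s2 > loc
    · rw [if_pos hgt, ih hnn']
      simp only [List.length_set, List.getElem?_set]
      by_cases hlen : j < lst.length
      · by_cases hrest : ∃ l ∈ rest, l = (j : Int) ∧ s2 > l
        · rw [if_pos ⟨hrest, hlen⟩,
             if_pos ⟨⟨hrest.choose, List.mem_cons_of_mem _ hrest.choose_spec.1, hrest.choose_spec.2⟩, hlen⟩]
        · rw [if_neg (fun h => hrest h.1)]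
          by_cases heq : loc.toNat = j
          · have hj : loc = (j : Int) := by omega
            rw [if_pos heq, if_pos (by omega : loc.toNat < lst.length),
               if_pos ⟨⟨loc, List.mem_cons_self, hj, hgt⟩, hlen⟩]
          · have hne : loc ≠ (j : Int) := by omega
            rw [if_neg heq, if_neg]
            rintro ⟨⟨l, hl, hlj, hs⟩, -⟩
            rcases List.mem_cons.mp hl with h | h
            · exact hne (by rw [← h]; exact hlj)
            · exact hrest ⟨l, h, hlj, hs⟩
      · have e1 : lst[j]? = none := List.getElem?_eq_none (by omega)
        have hR : ¬ ((∃ l ∈ loc :: rest, l = (j : Int) ∧ s2 > l) ∧ j < lst.length) :=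
          fun h => hlen h.2
        have hR' : ¬ ((∃ l ∈ rest, l = (j : Int) ∧ s2 > l) ∧ j < lst.length) :=
          fun h => hlen h.2
        rw [if_neg hR', if_neg hR]
        by_cases heq : loc.toNat = j
        · rw [if_pos heq, if_neg (show ¬ loc.toNat < lst.length by omega), e1]
        · rw [if_neg heq]
    · rw [if_neg hgt, ih hnn']
      by_cases hrest : (∃ l ∈ rest, l = (j : Int) ∧ s2 > l) ∧ j < lst.length
      · rw [if_pos hrest,
           if_pos ⟨⟨hrest.1.choose, List.mem_cons_of_mem _ hrest.1.choose_spec.1, hrest.1.choose_spec.2⟩, hrest.2⟩]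
      · rw [if_neg hrest, if_neg]
        rintro ⟨⟨l, hl, hlj, hs⟩, hjl⟩
        rcases List.mem_cons.mp hl with h | h
        · exact hgt (h ▸ hs)
        · exact hrest ⟨⟨l, h, hlj, hs⟩, hjl⟩

-- mask_locations membership: (j : Int) is collected iff s[j] exists and matches cm.
theorem mem_locs_iff (s : List Char) (cm : String) (j : Nat) :
    ((j : Int) ∈ (PySem.List.enumerate s 0).filterMap
        (fun p => if String.ofList [p.2] = cm then some p.1 else none))
    ↔ ∃ h : j < s.length, String.ofList [s[j]] = cm := by
  simp only [List.mem_filterMap, PySem.List.mem_enumerate_iff]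
  constructor
  · rintro ⟨p, ⟨k, hk, rfl⟩, hp⟩
    simp only [zero_add] at hp
    by_cases hc : String.ofList [s[k]] = cm
    · rw [if_pos hc] at hp
      have hkj : k = j := by exact_mod_cast Option.some_inj.mp hp
      exact ⟨hkj ▸ hk, hkj ▸ hc⟩
    · rw [if_neg hc] at hp
      exact absurd hp (by simp)
  · rintro ⟨h, hc⟩
    exact ⟨((j : Int), s[j]), ⟨j, h, by simp⟩, by rw [if_pos hc]⟩

-- every collected location is nonnegative
theorem locs_nonneg (s : List Char) (cm : String) :
    ∀ loc ∈ (PySem.List.enumerate s 0).filterMap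
        (fun p => if String.ofList [p.2] = cm then some p.1 else none), 0 ≤ loc := by
  intro loc hloc
  rcases List.mem_filterMap.mp hloc with ⟨p, hp, hpe⟩
  rcases (PySem.List.mem_enumerate_iff _ _ _).mp hp with ⟨k, hk, rfl⟩
  by_cases hc : String.ofList [s[k]] = cm
  · rw [if_pos hc] at hpe
    have := Option.some_inj.mp hpe
    simp only [zero_add] at this ⊢
    omega
  · rw [if_neg hc] at hpe; exact absurd hpe (by simp)

-- the scatter-written list equals B's per-entry choice, mapped over enumerate
theorem scatter_eq_map (s t : List Char) (cm : String) :
    (((PySem.List.enumerate s 0).filterMap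
        (fun p => if String.ofList [p.2] = cm then some p.1 else none)).foldl
      (fun l loc => if ((t.length : Int)) > loc then l.set loc.toNat cm else l)
      (t.map (fun c => String.ofList [c])))
    = (PySem.List.enumerate t 0).map
        (fun p =>
          if p.1 < (s.length : Int) ∧
             (PySem.List.pyGet? s p.1).map (fun c => String.ofList [c]) = some cm
          then cm else String.ofList [p.2]) := by
  apply List.ext_getElem?
  intro j
  rw [foldl_set_getElem? cm _ _ (locs_nonneg s cm), List.getElem?_map, List.getElem?_map,
     PySem.List.getElem?_enumerate]
  simp only [List.length_map, zero_add]
  by_cases hj : j < t.length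
  · rw [List.getElem?_eq_getElem hj]
    simp only [Option.map_some]
    by_cases hs : j < s.length
    · by_cases hc : String.ofList [s[j]] = cm
      · rw [if_pos ⟨⟨(j : Int), (mem_locs_iff s cm j).mpr ⟨hs, hc⟩, rfl, by exact_mod_cast hj⟩, hj⟩,
           if_pos ⟨by exact_mod_cast hs,
             by rw [PySem.List.pyGet?_natCast, List.getElem?_eq_getElem hs]; simp [hc]⟩]
      · have hA : ¬ ((∃ loc ∈ (PySem.List.enumerate s 0).filterMap
              (fun p => if String.ofList [p.2] = cm then some p.1 else none),
              loc = (j : Int) ∧ ((t.length : Int)) > loc) ∧ j < t.length) := by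
          rintro ⟨⟨loc, hloc, rfl, -⟩, -⟩
          obtain ⟨h1, hc'⟩ := (mem_locs_iff s cm j).mp hloc
          exact hc hc'
        have hB : ¬ ((j : Int) < (s.length : Int) ∧
            (PySem.List.pyGet? s (j : Int)).map (fun c => String.ofList [c]) = some cm) := by
          rintro ⟨-, hp⟩
          rw [PySem.List.pyGet?_natCast, List.getElem?_eq_getElem hs] at hp
          exact hc (Option.some_inj.mp hp)
        rw [if_neg hA, if_neg hB]
    · have hA : ¬ ((∃ loc ∈ (PySem.List.enumerate s 0).filterMap
            (fun p => if String.ofList [p.2] = cm then some p.1 else none),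
            loc = (j : Int) ∧ ((t.length : Int)) > loc) ∧ j < t.length) := by
        rintro ⟨⟨loc, hloc, rfl, -⟩, -⟩
        obtain ⟨h1, hc'⟩ := (mem_locs_iff s cm j).mp hloc
        exact hs h1
      have hB : ¬ ((j : Int) < (s.length : Int) ∧
          (PySem.List.pyGet? s (j : Int)).map (fun c => String.ofList [c]) = some cm) := by
        rintro ⟨hlt, -⟩
        exact hs (by exact_mod_cast hlt)
      rw [if_neg hA, if_neg hB]
  · rw [if_neg (fun h => hj h.2), List.getElem?_eq_none (by omega)]
    simp

-- ===== VERDICT (by name: the statement is the Claim_ definition above) =====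
theorem mask_string_for_validation_spec : Claim_equal_mask_string_for_validation := by
  intro swm stm cm _
  show mask_string_for_validation swm stm cm = mask_string_for_validation_alt swm stm cm
  simp only [mask_string_for_validation, mask_string_for_validation_alt]
  apply congrArg String.ofList
  rw [scatter_eq_map swm.toList stm.toList cm, List.flatMap_def, List.flatMap_def, List.map_map]
  apply congrArg List.flatten
  apply List.map_congr_left
  intro p _
  simp only [Function.comp_apply]
  split_ifs
  · rfl
  · simp
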